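-- pv_equiv track=rewrite | github.com/Dulshan201/Train-booking-system | security.py | _has_common_patterns
-- ===== SOURCE A (Python) =====
-- def _has_common_patterns(password: str) -> bool:
--     """Check for common weak password patterns"""
--     common_patterns = [
--         r'123456',
--         r'password',
--         r'qwerty',
--         r'abc123',
--         r'admin',
--         r'letmein',
--         r'welcome',
--         r'monkey'
--     ]
--
--     password_lower = password.lower()
--     for pattern in common_patterns:
--         if pattern in password_lower:
--             return True
--
--     return False
-- ===== SOURCE B (Python) =====
-- def _has_common_patterns(password: str) -> bool:
--     """Single left-to-right scan: at each position test whether any weak pattern starts there."""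
--     patterns = ('123456', 'password', 'qwerty', 'abc123', 'admin', 'letmein', 'welcome', 'monkey')
--     s = password.lower()
--     return any(s.startswith(p, i) for i in range(len(s)) for p in patterns)
-- ===== Notes on version B (the rewrite author's own statement) =====
-- stated objective: alternative
-- what changed: Replaces eight sequential whole-string substring searches with a single left-to-right scan that tests at each position whether any pattern starts there.
import Mathlib
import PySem

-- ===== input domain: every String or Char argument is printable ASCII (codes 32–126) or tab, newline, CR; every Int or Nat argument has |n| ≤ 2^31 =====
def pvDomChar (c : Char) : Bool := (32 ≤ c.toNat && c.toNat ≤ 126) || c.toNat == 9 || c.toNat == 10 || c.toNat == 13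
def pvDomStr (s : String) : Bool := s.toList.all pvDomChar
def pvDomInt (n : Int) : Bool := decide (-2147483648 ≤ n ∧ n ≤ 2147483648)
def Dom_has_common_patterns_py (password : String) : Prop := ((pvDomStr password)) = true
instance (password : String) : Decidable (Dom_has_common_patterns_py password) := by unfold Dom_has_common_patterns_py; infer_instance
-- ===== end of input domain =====

-- B replaces A's eight sequential substring searches by one left-to-right positional scan (alternative decomposition, same cost).


-- ===== PORT A =====
-- the for-loop over common_patterns: return True on the first pattern contained in password_lower
def hcpLoopA (pats : List String) (pl : String) : Bool :=
  match pats with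
  | [] => false
  | p :: rest => if PySem.Str.isIn p pl then true else hcpLoopA rest pl

def has_common_patterns_py (password : String) : Bool :=
  hcpLoopA ["123456", "password", "qwerty", "abc123", "admin", "letmein", "welcome", "monkey"]
    (PySem.Str.lower password)

-- ===== PORT B =====
-- B's single scan: at each position of the lowered string, test whether any pattern starts there
def hcpScanB (pats : List (List Char)) : List Char → Bool
  | [] => false
  | c :: t => if pats.any (fun p => p.isPrefixOf (c :: t)) then true else hcpScanB pats t

def has_common_patterns_py_alt (password : String) : Bool :=
  hcpScanB
    ["123456".toList, "password".toList, "qwerty".toList, "abc123".toList,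
     "admin".toList, "letmein".toList, "welcome".toList, "monkey".toList]
    (PySem.Str.lower password).toList

-- ===== PRECONDITION & SPEC =====
def Spec_has_common_patterns_py (password : String) (out : Bool) : Prop := out = has_common_patterns_py_alt password
instance (password : String) (out : Bool) : Decidable (Spec_has_common_patterns_py password out) := by unfold Spec_has_common_patterns_py; infer_instance

-- ===== CLAIM (what is proved, stated in full; the proofs are below) =====
def Claim_equal_has_common_patterns_py : Prop := ∀ (password : String), Dom_has_common_patterns_py password → Spec_has_common_patterns_py password (has_common_patterns_py password)

-- ===== LEMMAS AND PROOFS =====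

-- A's early-return loop is an `any` over the pattern list
lemma hcpLoopA_eq_any (pats : List String) (pl : String) :
    hcpLoopA pats pl = pats.any (fun p => PySem.Str.isIn p pl) := by
  induction pats with
  | nil => rfl
  | cons p rest ih =>
    rw [show hcpLoopA (p :: rest) pl
        = if PySem.Str.isIn p pl then true else hcpLoopA rest pl from rfl, List.any_cons, ih]
    cases h : PySem.Str.isIn p pl <;> simp

-- B's scan finds exactly the inputs where some (nonempty) pattern is a prefix of some suffix
lemma hcpScanB_iff (pats : List (List Char)) (hne : ∀ p ∈ pats, p ≠ []) (s : List Char) :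
    hcpScanB pats s = true ↔ ∃ j, ∃ p ∈ pats, p <+: s.drop j := by
  induction s with
  | nil =>
    simp only [hcpScanB, List.drop_nil]
    constructor
    · intro h; exact absurd h (by simp)
    · rintro ⟨j, p, hp, hpre⟩
      exact absurd (List.prefix_nil.mp hpre) (hne p hp)
  | cons c t ih =>
    rw [show hcpScanB pats (c :: t)
        = if pats.any (fun p => p.isPrefixOf (c :: t)) then true else hcpScanB pats t from rfl]
    by_cases h0 : pats.any (fun p => p.isPrefixOf (c :: t)) = true
    · rw [if_pos h0]
      rcases List.any_eq_true.mp h0 with ⟨p, hp, hpre⟩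
      exact ⟨fun _ => ⟨0, p, hp, List.isPrefixOf_iff_prefix.mp hpre⟩, fun _ => rfl⟩
    · rw [if_neg h0, ih]
      constructor
      · rintro ⟨j, p, hp, hpre⟩; exact ⟨j + 1, p, hp, by simpa using hpre⟩
      · rintro ⟨j, p, hp, hpre⟩
        cases j with
        | zero =>
          exact absurd (List.any_eq_true.mpr
            ⟨p, hp, (List.isPrefixOf_iff_prefix.mpr hpre : p.isPrefixOf (c :: t) = true)⟩) h0
        | succ k => exact ⟨k, p, hp, by simpa using hpre⟩

-- eight `in`-searches over the whole string find a pattern iff the positional scan does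
lemma hcp_any_eq_scan (pats : List String) (hne : ∀ p ∈ pats, p.toList ≠ []) (pl : String) :
    pats.any (fun p => PySem.Str.isIn p pl) = hcpScanB (pats.map String.toList) pl.toList := by
  rw [Bool.eq_iff_iff, hcpScanB_iff _ (by simpa using hne), List.any_eq_true]
  simp only [PySem.Str.isIn_eq, ← PySem.Chars.exists_prefix_drop_iff_isIn, List.mem_map]
  constructor
  · rintro ⟨p, hp, j, h⟩; exact ⟨j, p.toList, ⟨p, hp, rfl⟩, h⟩
  · rintro ⟨j, q, ⟨p, hp, rfl⟩, h⟩; exact ⟨p, hp, j, h⟩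

-- ===== VERDICT (by name: the statement is the Claim_ definition above) =====
theorem has_common_patterns_py_spec : Claim_equal_has_common_patterns_py := by
  intro password _
  unfold Spec_has_common_patterns_py has_common_patterns_py has_common_patterns_py_alt
  rw [hcpLoopA_eq_any, hcp_any_eq_scan _ (by decide)]
  rfl
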